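-- pv_equiv track=rewrite | github.com/Atlante45/Advent-of-Code | 2021/day11/script.py | part2
-- ===== SOURCE A (Python) =====
-- def neighbors(i, j, max_i, max_j):
--     cells = [
--         (i - 1, j - 1),
--         (i + 1, j + 1),
--         (i - 1, j + 1),
--         (i + 1, j - 1),
--         (i - 1, j),
--         (i + 1, j),
--         (i, j - 1),
--         (i, j + 1),
--     ]
--
--     return [(x, y) for (x, y) in cells if x >= 0 and x < max_i and y >= 0 and y < max_j]
--
-- def step(energy, i, j):
--     res = 0
--
--     if energy[i][j] > 9:
--         return 0
--
--     energy[i][j] += 1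
--     if energy[i][j] > 9:
--         res += 1
--         for (x, y) in neighbors(i, j, len(energy), len(energy[0])):
--             res += step(energy, x, y)
--
--     return res
--
-- def part2(input):
--     res = 0
--
--     energy = []
--     for line in input:
--         energy.append([int(v) for v in line.strip()])
--
--     for n in range(10000000):
--         for i in range(len(energy)):
--             for j in range(len(energy[0])):
--                 res += step(energy, i, j)
--
--         count = 0
--         for i in range(len(energy)):
--             for j in range(len(energy[0])):
--                 if energy[i][j] > 9:
--                     count += 1
--                     energy[i][j] = 0
--
--         if count == len(energy) * len(energy[0]):
--             return n + 1
--
--     return res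
-- ===== SOURCE B (Python) =====
-- def part2(input):
--     OFFS = [(-1, -1), (1, 1), (-1, 1), (1, -1), (-1, 0), (1, 0), (0, -1), (0, 1)]
--     energy = [[int(v) for v in line.strip()] for line in input]
--     rows, cols = len(energy), len(energy[0])
--     res = 0
--     for n in range(10000000):
--         flashes = 0
--         stack = [(i, j) for i in range(rows) for j in range(cols)]
--         stack.reverse()
--         while stack:
--             i, j = stack.pop()
--             if energy[i][j] > 9:
--                 continue
--             energy[i][j] += 1
--             if energy[i][j] > 9:
--                 flashes += 1
--                 for di, dj in reversed(OFFS):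
--                     x, y = i + di, j + dj
--                     if 0 <= x < rows and 0 <= y < cols:
--                         stack.append((x, y))
--         energy = [[0 if v > 9 else v for v in row] for row in energy]
--         if flashes == rows * cols:
--             return n + 1
--         res += flashes
--     return res
-- ===== Notes on version B (the rewrite author's own statement) =====
-- stated objective: alternative
-- what changed: The recursive flash cascade (per-cell recursion with mutation) is replaced by a single explicit worklist stack per step, seeded with every cell in row-major order and drained iteratively, with flashes counted inline during the drain instead of by A's separate re-scan pass, and the reset done by a comprehension; same asymptotic cost.
-- outside the precondition, e.g. on part2(['11', '1']): A raises IndexError, B raises IndexError; on part2(['88', '888']): A returns 2, B returns 2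
import Mathlib
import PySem

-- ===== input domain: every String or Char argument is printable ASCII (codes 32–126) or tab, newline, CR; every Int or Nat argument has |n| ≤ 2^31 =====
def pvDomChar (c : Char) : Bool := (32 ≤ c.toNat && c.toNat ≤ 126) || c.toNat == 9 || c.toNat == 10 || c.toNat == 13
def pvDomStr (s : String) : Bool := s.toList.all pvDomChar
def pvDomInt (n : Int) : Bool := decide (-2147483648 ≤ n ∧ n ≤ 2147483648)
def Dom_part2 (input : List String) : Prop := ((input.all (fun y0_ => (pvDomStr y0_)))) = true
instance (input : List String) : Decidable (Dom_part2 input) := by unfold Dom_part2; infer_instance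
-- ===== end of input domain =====

-- B replaces A's recursive flash cascade by an explicit worklist stack per step (seeded with all
-- cells in row-major order, drained iteratively, counting flashes inline, comprehension reset);
-- same cost, different decomposition.  A mutates nothing observable (it builds its own grid).


-- ===== PORT A =====
-- shared grid primitives (all call sites keep indices in bounds and non-negative, so
-- `.toNat` + `getD`/`set` are exact for the Python `energy[i][j]` accesses here)
def pvGet (g : List (List Int)) (i j : Int) : Int := (g.getD i.toNat []).getD j.toNat 0
def pvSet (g : List (List Int)) (i j : Int) (v : Int) : List (List Int) :=
  g.set i.toNat ((g.getD i.toNat []).set j.toNat v)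
def pvNbrs (i j mi mj : Int) : List (Int × Int) :=
  ([(i-1,j-1),(i+1,j+1),(i-1,j+1),(i+1,j-1),(i-1,j),(i+1,j),(i,j-1),(i,j+1)]).filter
    (fun p => decide (0 ≤ p.1) && decide (p.1 < mi) && decide (0 ≤ p.2) && decide (p.2 < mj))
-- termination measure for the cascade: every increment of a cell ≤ 9 strictly decreases it
def pvRowMeas (r : List Int) : Nat := (r.map (fun e => (11 - e).toNat)).sum
def pvMeas (g : List (List Int)) : Nat := (g.map pvRowMeas).sum

-- A's recursive `step`, with fuel (the caller passes pvMeas g + 1, which always suffices: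
-- each nested call is preceded by an increment, and increments strictly decrease pvMeas)
def stepA : Nat → List (List Int) → Int → Int → Int × List (List Int)
  | 0, g, _, _ => (0, g)
  | f+1, g, i, j =>
    if 9 < pvGet g i j then (0, g)
    else
      let g1 := pvSet g i j (pvGet g i j + 1)
      if 9 < pvGet g1 i j then
        (pvNbrs i j (g1.length : Int) ((g1.headD []).length : Int)).foldl
          (fun s p => (s.1 + (stepA f s.2 p.1 p.2).1, (stepA f s.2 p.1 p.2).2)) (1, g1)
      else (0, g1)

-- `for i in range(len(energy)): for j in range(len(energy[0])): res += step(energy, i, j)`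
def pvPass1 (st : Int × List (List Int)) : Int × List (List Int) :=
  (PySem.List.pyRange 0 (st.2.length : Int) 1).foldl (fun s i =>
    (PySem.List.pyRange 0 ((s.2.headD []).length : Int) 1).foldl (fun s2 j =>
      (s2.1 + (stepA (pvMeas s2.2 + 1) s2.2 i j).1, (stepA (pvMeas s2.2 + 1) s2.2 i j).2)) s) st

-- the count-and-zero double loop
def pvPass2 (g : List (List Int)) : Int × List (List Int) :=
  (PySem.List.pyRange 0 (g.length : Int) 1).foldl (fun s i =>
    (PySem.List.pyRange 0 ((s.2.headD []).length : Int) 1).foldl (fun s2 j =>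
      if 9 < pvGet s2.2 i j then (s2.1 + 1, pvSet s2.2 i j 0) else s2) s) (0, g)

def pvLoopA : Nat → Int → Int → List (List Int) → Int
  | 0, _, res, _ => res
  | k+1, n, res, g =>
    let p1 := pvPass1 (res, g)
    let p2 := pvPass2 p1.2
    if p2.1 = (p2.2.length : Int) * ((p2.2.headD []).length : Int) then n + 1
    else pvLoopA k (n+1) p1.1 p2.2

def pvParse (input : List String) : List (List Int) :=
  input.map (fun line =>
    (PySem.Str.strip line).toList.map (fun c => (PySem.Int.ofStr? (String.ofList [c])).getD 0))

def part2 (input : List String) : Int :=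
  pvLoopA 10000000 0 0 (pvParse input)

-- ===== PORT B =====
-- lemmas the worklist's termination proof cites (proofs below would be illegal: they are here)
theorem pvRowMeas_set_le (r : List Int) (k : Nat) (h : r.getD k 0 ≤ 9) :
    pvRowMeas (r.set k (r.getD k 0 + 1)) ≤ pvRowMeas r := by
  induction r generalizing k with
  | nil => simp [pvRowMeas]
  | cons a t ih =>
    cases k with
    | zero => simp only [List.getD_cons_zero] at h ⊢
              simp only [List.set_cons_zero, pvRowMeas, List.map_cons, List.sum_cons]
              omega
    | succ k => simp only [List.getD_cons_succ] at h ⊢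
                simp only [List.set_cons_succ, pvRowMeas, List.map_cons, List.sum_cons]
                have := ih k h; simp only [pvRowMeas] at this; omega

theorem pvRowMeas_set_lt (r : List Int) (k : Nat) (h : r.getD k 0 ≤ 9)
    (h2 : 9 < (r.set k (r.getD k 0 + 1)).getD k 0) :
    pvRowMeas (r.set k (r.getD k 0 + 1)) < pvRowMeas r := by
  induction r generalizing k with
  | nil => simp at h2
  | cons a t ih =>
    cases k with
    | zero => simp only [List.set_cons_zero, List.getD_cons_zero] at h h2 ⊢
              simp only [pvRowMeas, List.map_cons, List.sum_cons]
              omega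
    | succ k => simp only [List.set_cons_succ, List.getD_cons_succ] at h h2 ⊢
                simp only [pvRowMeas, List.map_cons, List.sum_cons]
                have := ih k h h2; simp only [pvRowMeas] at this; omega

theorem pvMeasN_set_le (g : List (List Int)) (k : Nat) (j : Nat)
    (h : (g.getD k []).getD j 0 ≤ 9) :
    pvMeas (g.set k ((g.getD k []).set j ((g.getD k []).getD j 0 + 1))) ≤ pvMeas g := by
  induction g generalizing k with
  | nil => simp [pvMeas]
  | cons r t ih =>
    cases k with
    | zero => simp only [List.getD_cons_zero] at h ⊢
              simp only [List.set_cons_zero, pvMeas, List.map_cons, List.sum_cons]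
              have := pvRowMeas_set_le r j h; omega
    | succ k => simp only [List.getD_cons_succ] at h ⊢
                simp only [List.set_cons_succ, pvMeas, List.map_cons, List.sum_cons]
                have := ih k h; simp only [pvMeas] at this; omega

theorem pvMeasN_set_lt (g : List (List Int)) (k : Nat) (j : Nat)
    (h : (g.getD k []).getD j 0 ≤ 9)
    (h2 : 9 < ((g.set k ((g.getD k []).set j ((g.getD k []).getD j 0 + 1))).getD k []).getD j 0) :
    pvMeas (g.set k ((g.getD k []).set j ((g.getD k []).getD j 0 + 1))) < pvMeas g := by
  induction g generalizing k with
  | nil => simp at h2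
  | cons r t ih =>
    cases k with
    | zero => simp only [List.set_cons_zero, List.getD_cons_zero] at h h2 ⊢
              simp only [pvMeas, List.map_cons, List.sum_cons]
              have := pvRowMeas_set_lt r j h h2; omega
    | succ k => simp only [List.set_cons_succ, List.getD_cons_succ] at h h2 ⊢
                simp only [pvMeas, List.map_cons, List.sum_cons]
                have := ih k h h2; simp only [pvMeas] at this; omega

theorem pvMeas_set_le (g : List (List Int)) (i j : Int) (h : pvGet g i j ≤ 9) :
    pvMeas (pvSet g i j (pvGet g i j + 1)) ≤ pvMeas g :=
  pvMeasN_set_le g i.toNat j.toNat h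

theorem pvMeas_set_lt (g : List (List Int)) (i j : Int) (h : pvGet g i j ≤ 9)
    (h2 : 9 < pvGet (pvSet g i j (pvGet g i j + 1)) i j) :
    pvMeas (pvSet g i j (pvGet g i j + 1)) < pvMeas g :=
  pvMeasN_set_lt g i.toNat j.toNat (by exact h) (by
    have := h2; unfold pvGet pvSet at this; exact this)

-- Source B's `while stack:` loop; the Lean list's head is the top of the Python stack
-- (Source B pops from the end of the reversed seed list and extends with reversed offsets,
-- which is the same stack with the same pop order)
def pvDrain (R C : Int) : List (List Int) → Int → List (Int × Int) → Int × List (List Int)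
  | g, acc, [] => (acc, g)
  | g, acc, p :: rest =>
    if 9 < pvGet g p.1 p.2 then pvDrain R C g acc rest
    else
      let g1 := pvSet g p.1 p.2 (pvGet g p.1 p.2 + 1)
      if _hfl : 9 < pvGet g1 p.1 p.2 then
        pvDrain R C g1 (acc + 1) (pvNbrs p.1 p.2 R C ++ rest)
      else pvDrain R C g1 acc rest
  termination_by g _ s => (pvMeas g, s.length)
  decreasing_by
  · exact Prod.Lex.right _ (Nat.lt_succ_self _)
  · exact Prod.Lex.left _ _ (pvMeas_set_lt _ _ _ (by omega) _hfl)
  · rcases Nat.lt_or_eq_of_le (pvMeas_set_le g p.1 p.2 (by omega)) with hlt | heq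
    · exact Prod.Lex.left _ _ hlt
    · rw [heq]; exact Prod.Lex.right _ (Nat.lt_succ_self _)

def pvSeeds (rows cols : Int) : List (Int × Int) :=
  (PySem.List.pyRange 0 rows 1).flatMap (fun i =>
    (PySem.List.pyRange 0 cols 1).map (fun j => (i, j)))

def pvResetRow (r : List Int) : List Int := r.map (fun v => if 9 < v then 0 else v)

def pvLoopB : Nat → Int → Int → Int → Int → List (List Int) → Int
  | 0, _, _, _, res, _ => res
  | k+1, rows, cols, n, res, g =>
    let d := pvDrain rows cols g 0 (pvSeeds rows cols)
    let g2 := d.2.map pvResetRow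
    if d.1 = rows * cols then n + 1
    else pvLoopB k rows cols (n+1) (res + d.1) g2

def part2_alt (input : List String) : Int :=
  let energy := input.map (fun line =>
    (PySem.Str.strip line).toList.map (fun c => (PySem.Int.ofStr? (String.ofList [c])).getD 0))
  pvLoopB 10000000 (energy.length : Int) ((energy.headD []).length : Int) 0 0 energy

-- ===== PRECONDITION & SPEC =====
-- Pre_ excludes non-rectangular grids (rows stripping shorter than the first make A raise
-- IndexError; rows stripping longer are excluded for uniformity although A returns there,
-- silently ignoring the extra cells), the empty list (IndexError), and lines whose stripped
-- characters are not ASCII digits (int(v) raises ValueError).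
def Pre_part2 (input : List String) : Prop :=
  input ≠ [] ∧
  (input.all (fun line => (PySem.Chars.strip line.toList).all
    (fun c => decide (48 ≤ c.toNat) && decide (c.toNat ≤ 57)))) = true ∧
  (input.all (fun line =>
    (PySem.Chars.strip line.toList).length
      == (PySem.Chars.strip (input.headD "").toList).length)) = true
instance (input : List String) : Decidable (Pre_part2 input) := by
  unfold Pre_part2; infer_instance

def pvWitness_part2 : List String := ["11", "11"]

def Spec_part2 (input : List String) (out : Int) : Prop := out = part2_alt input
instance (input : List String) (out : Int) : Decidable (Spec_part2 input out) := by
  unfold Spec_part2; infer_instance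

-- ===== CLAIM (what is proved, stated in full; the proofs are below) =====
def Claim_equal_part2 : Prop :=
  ∀ (input : List String), Dom_part2 input → Pre_part2 input → Spec_part2 input (part2 input)

-- ===== LEMMAS AND PROOFS =====

def ShapedG (R C : Nat) (g : List (List Int)) : Prop :=
  g.length = R ∧ ∀ r ∈ g, r.length = C

def pvRowOver (r : List Int) : Nat := r.countP (fun e => decide (9 < e))
def pvOver (g : List (List Int)) : Nat := (g.map pvRowOver).sum


-- shape utilities
theorem shaped_headD {R C : Nat} {g : List (List Int)} (h : ShapedG R C g) (hR : 0 < R) :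
    (g.headD []).length = C := by
  cases g with
  | nil => exact absurd h.1 (by simp; omega)
  | cons r t => exact h.2 r (by simp)

theorem shaped_set {R C : Nat} {g : List (List Int)} (h : ShapedG R C g) (i j : Int) (v : Int) :
    ShapedG R C (pvSet g i j v) := by
  unfold pvSet
  refine ⟨by simpa using h.1, ?_⟩
  intro r hr
  by_cases hlt : i.toNat < g.length
  · rcases List.mem_or_eq_of_mem_set hr with hmem | heq
    · exact h.2 r hmem
    · subst heq
      have : g.getD i.toNat [] ∈ g := by
        rw [List.getD_eq_getElem?_getD, List.getElem?_eq_getElem hlt]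
        exact List.getElem_mem _
      simpa using h.2 _ this
  · rw [List.set_eq_of_length_le (by omega)] at hr
    exact h.2 r hr

theorem shaped_pos {R C : Nat} {g : List (List Int)} (h : ShapedG R C g) {i j : Int}
    (hf : 9 < pvGet g i j) : 0 < R := by
  rcases Nat.eq_zero_or_pos R with h0 | h1
  · subst h0
    have : g = [] := List.length_eq_zero_iff.mp h.1
    subst this
    simp [pvGet] at hf
  · exact h1

-- pvRowOver / pvOver under an increment
theorem pvRowOver_set (r : List Int) (k : Nat) (h : r.getD k 0 ≤ 9) :
    (pvRowOver (r.set k (r.getD k 0 + 1)) : Int)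
      = (pvRowOver r : Int) + (if 9 < (r.set k (r.getD k 0 + 1)).getD k 0 then 1 else 0) := by
  induction r generalizing k with
  | nil => simp [pvRowOver]
  | cons a t ih =>
    cases k with
    | zero => simp only [List.set_cons_zero, List.getD_cons_zero] at h ⊢
              simp only [pvRowOver, List.countP_cons, decide_eq_true_eq]
              split_ifs <;> push_cast <;> omega
    | succ k => simp only [List.set_cons_succ, List.getD_cons_succ] at h ⊢
                simp only [pvRowOver, List.countP_cons, decide_eq_true_eq]
                have := ih k h; simp only [pvRowOver] at this
                split_ifs at this ⊢ <;> push_cast at this ⊢ <;> omega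

theorem pvOverN_set (g : List (List Int)) (k j : Nat)
    (h : (g.getD k []).getD j 0 ≤ 9) :
    (pvOver (g.set k ((g.getD k []).set j ((g.getD k []).getD j 0 + 1))) : Int)
      = (pvOver g : Int)
        + (if 9 < ((g.set k ((g.getD k []).set j ((g.getD k []).getD j 0 + 1))).getD k []).getD j 0
           then 1 else 0) := by
  induction g generalizing k with
  | nil => simp [pvOver]
  | cons r t ih =>
    cases k with
    | zero => simp only [List.set_cons_zero, List.getD_cons_zero] at h ⊢
              simp only [pvOver, List.map_cons, List.sum_cons]
              have := pvRowOver_set r j h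
              split_ifs at this ⊢ <;> push_cast at this ⊢ <;> omega
    | succ k => simp only [List.set_cons_succ, List.getD_cons_succ] at h ⊢
                simp only [pvOver, List.map_cons, List.sum_cons]
                have := ih k h; simp only [pvOver] at this
                split_ifs at this ⊢ <;> push_cast at this ⊢ <;> omega

theorem pvOver_set (g : List (List Int)) (i j : Int) (h : pvGet g i j ≤ 9) :
    (pvOver (pvSet g i j (pvGet g i j + 1)) : Int)
      = (pvOver g : Int) + (if 9 < pvGet (pvSet g i j (pvGet g i j + 1)) i j then 1 else 0) :=
  pvOverN_set g i.toNat j.toNat h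

theorem pvOver_eq_zero_iff (g : List (List Int)) :
    pvOver g = 0 ↔ ∀ r ∈ g, ∀ e ∈ r, e ≤ 9 := by
  unfold pvOver pvRowOver
  rw [List.sum_eq_zero_iff]
  constructor
  · intro h r hr e he
    have := h _ (List.mem_map_of_mem hr)
    rw [List.countP_eq_zero] at this
    have := this e he; simpa using this
  · intro h x hx
    rcases List.mem_map.mp hx with ⟨r, hr, rfl⟩
    rw [List.countP_eq_zero]
    intro e he; simpa using h r hr e he

theorem pvOver_reset (g : List (List Int)) : pvOver (g.map pvResetRow) = 0 := by
  rw [pvOver_eq_zero_iff]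
  intro r hr e he
  rcases List.mem_map.mp hr with ⟨r0, _, rfl⟩
  rcases List.mem_map.mp he with ⟨v, _, rfl⟩
  split_ifs <;> omega

-- generic fold utilities
theorem foldl_invar {α β : Type} (P : α → Prop) (f : α → β → α)
    (L : List β) (a : α) (ha : P a) (hstep : ∀ a x, P a → P (f a x)) : P (L.foldl f a) := by
  induction L generalizing a with
  | nil => exact ha
  | cons x t ih => exact ih _ (hstep a x ha)

theorem foldl_congr_invar {α β : Type} (P : α → Prop) (f f' : α → β → α)
    (L : List β) (a : α) (ha : P a) (heq : ∀ a x, P a → f a x = f' a x)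
    (hstep : ∀ a x, P a → P (f a x)) : L.foldl f a = L.foldl f' a := by
  induction L generalizing a with
  | nil => rfl
  | cons x t ih => rw [List.foldl_cons, List.foldl_cons, ← heq a x ha]
                   exact ih _ (hstep a x ha)

theorem foldl_flatMap_foldl {α β γ : Type} (K : β → List γ) (f : α → γ → α)
    (L : List β) (a : α) :
    (L.flatMap K).foldl f a = L.foldl (fun a i => (K i).foldl f a) a := by
  induction L generalizing a with
  | nil => rfl
  | cons x t ih => rw [List.flatMap_cons, List.foldl_append, List.foldl_cons, ih]

theorem foldl_shift {α : Type} (f : List (List Int) → α → Int × List (List Int))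
    (L : List α) (a : Int) (g : List (List Int)) :
    L.foldl (fun s p => (s.1 + (f s.2 p).1, (f s.2 p).2)) (a, g)
      = (a + (L.foldl (fun s p => (s.1 + (f s.2 p).1, (f s.2 p).2)) ((0:Int), g)).1,
         (L.foldl (fun s p => (s.1 + (f s.2 p).1, (f s.2 p).2)) ((0:Int), g)).2) := by
  induction L generalizing a g with
  | nil => simp
  | cons x t ih =>
    rw [List.foldl_cons, List.foldl_cons, ih, ih (0 + (f g x).1)]
    simp only [Prod.mk.injEq, and_true]
    ring

-- getD / set in the middle of an append
theorem getD_mid {α : Type} [Inhabited α] (pre : List α) (x : α) (post : List α) (d : α) :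
    (pre ++ x :: post).getD pre.length d = x := by
  induction pre with
  | nil => rfl
  | cons a t ih => simp

theorem set_mid {α : Type} (pre : List α) (x v : α) (post : List α) :
    (pre ++ x :: post).set pre.length v = pre ++ v :: post := by
  induction pre with
  | nil => rfl
  | cons a t ih => simp

theorem headD_len {C : Nat} (g : List (List Int)) (hne : g ≠ [])
    (h : ∀ r ∈ g, r.length = C) : (g.headD []).length = C := by
  cases g with
  | nil => exact absurd rfl hne
  | cons r t => exact h r (by simp)


-- unfolding lemmas for the two cascade engines
theorem stepA_succ (f : Nat) (g : List (List Int)) (i j : Int) :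
    stepA (f+1) g i j =
      if 9 < pvGet g i j then (0, g)
      else
        if 9 < pvGet (pvSet g i j (pvGet g i j + 1)) i j then
          (pvNbrs i j ((pvSet g i j (pvGet g i j + 1)).length : Int)
              (((pvSet g i j (pvGet g i j + 1)).headD []).length : Int)).foldl
            (fun s p => (s.1 + (stepA f s.2 p.1 p.2).1, (stepA f s.2 p.1 p.2).2))
            (1, pvSet g i j (pvGet g i j + 1))
        else (0, pvSet g i j (pvGet g i j + 1)) := rfl

theorem pvDrain_nil (R C : Int) (g : List (List Int)) (acc : Int) :
    pvDrain R C g acc [] = (acc, g) := by rw [pvDrain]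

theorem pvDrain_cons (R C : Int) (g : List (List Int)) (acc i j : Int)
    (rest : List (Int × Int)) :
    pvDrain R C g acc ((i, j) :: rest) =
      if 9 < pvGet g i j then pvDrain R C g acc rest
      else
        if 9 < pvGet (pvSet g i j (pvGet g i j + 1)) i j then
          pvDrain R C (pvSet g i j (pvGet g i j + 1)) (acc + 1) (pvNbrs i j R C ++ rest)
        else pvDrain R C (pvSet g i j (pvGet g i j + 1)) acc rest := by
  rw [pvDrain]; simp only [dite_eq_ite]

def pvFoldA (f : Nat) (L : List (Int × Int)) (s : Int × List (List Int)) :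
    Int × List (List Int) :=
  L.foldl (fun s p => (s.1 + (stepA f s.2 p.1 p.2).1, (stepA f s.2 p.1 p.2).2)) s

theorem pvFoldA_shift (f : Nat) (L : List (Int × Int)) (a : Int) (g : List (List Int)) :
    pvFoldA f L (a, g) = (a + (pvFoldA f L (0, g)).1, (pvFoldA f L (0, g)).2) := by
  exact foldl_shift (α := Int × Int) (fun h q => stepA f h q.1 q.2) L a g

def pvStepAProp (f : Nat) : Prop :=
  ∀ (R C : Nat) (g : List (List Int)) (i j acc : Int) (S : List (Int × Int)),
    ShapedG R C g → pvMeas g < f →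
    pvDrain (R : Int) (C : Int) g acc ((i, j) :: S)
        = pvDrain (R : Int) (C : Int) (stepA f g i j).2 (acc + (stepA f g i j).1) S
      ∧ pvMeas (stepA f g i j).2 ≤ pvMeas g
      ∧ ShapedG R C (stepA f g i j).2
      ∧ ((pvOver (stepA f g i j).2 : Int) = (pvOver g : Int) + (stepA f g i j).1)

theorem foldA_sim (f : Nat) (hP : pvStepAProp f) (R C : Nat) :
    ∀ (L : List (Int × Int)) (g : List (List Int)) (acc : Int) (S : List (Int × Int)),
      ShapedG R C g → pvMeas g < f →
      pvDrain (R : Int) (C : Int) g acc (L ++ S)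
          = pvDrain (R : Int) (C : Int) (pvFoldA f L (0, g)).2 (acc + (pvFoldA f L (0, g)).1) S
        ∧ pvMeas (pvFoldA f L (0, g)).2 ≤ pvMeas g
        ∧ ShapedG R C (pvFoldA f L (0, g)).2
        ∧ ((pvOver (pvFoldA f L (0, g)).2 : Int) = (pvOver g : Int) + (pvFoldA f L (0, g)).1) := by
  intro L
  induction L with
  | nil =>
    intro g acc S hS hm
    have e : pvFoldA f [] ((0 : Int), g) = (0, g) := rfl
    rw [List.nil_append, e]
    exact ⟨by rw [add_zero], le_refl _, hS, by simp⟩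
  | cons p t ih =>
    intro g acc S hS hm
    obtain ⟨h1, h2, h3, h4⟩ := hP R C g p.1 p.2 acc (t ++ S) hS hm
    obtain ⟨i1, i2, i3, i4⟩ := ih (stepA f g p.1 p.2).2 (acc + (stepA f g p.1 p.2).1) S h3
      (lt_of_le_of_lt h2 hm)
    have hfold : pvFoldA f (p :: t) (0, g)
        = (0 + (stepA f g p.1 p.2).1 + (pvFoldA f t (0, (stepA f g p.1 p.2).2)).1,
           (pvFoldA f t (0, (stepA f g p.1 p.2).2)).2) := by
      show pvFoldA f t (0 + (stepA f g p.1 p.2).1, (stepA f g p.1 p.2).2) = _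
      rw [pvFoldA_shift]
    refine ⟨?_, ?_, ?_, ?_⟩
    · rw [List.cons_append, h1, i1, hfold]
      congr 1
      ring
    · rw [hfold]
      exact le_trans i2 h2
    · rw [hfold]; exact i3
    · rw [hfold]
      dsimp only
      omega

theorem stepA_sim : ∀ f, pvStepAProp f := by
  intro f
  induction f using Nat.strong_induction_on with
  | _ f IH =>
  match f with
  | 0 => intro R C g i j acc S hS hm; omega
  | Nat.succ f' =>
    intro R C g i j acc S hS hm
    by_cases hg : 9 < pvGet g i j
    · simp only [stepA_succ, if_pos hg]
      exact ⟨by rw [pvDrain_cons, if_pos hg, add_zero], le_refl _, hS, by simp⟩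
    · have hg' : pvGet g i j ≤ 9 := by omega
      have hS1 : ShapedG R C (pvSet g i j (pvGet g i j + 1)) := shaped_set hS i j _
      by_cases hf : 9 < pvGet (pvSet g i j (pvGet g i j + 1)) i j
      · -- flash: the cell cascades into its neighbours
        have hR : 0 < R := shaped_pos hS1 hf
        have hlen : (pvSet g i j (pvGet g i j + 1)).length = R := hS1.1
        have hhd : ((pvSet g i j (pvGet g i j + 1)).headD []).length = C := shaped_headD hS1 hR
        have hm1 : pvMeas (pvSet g i j (pvGet g i j + 1)) < f' := by
          have := pvMeas_set_lt g i j hg' hf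
          omega
        obtain ⟨f1, f2, f3, f4⟩ := foldA_sim f' (IH f' (by omega)) R C
          (pvNbrs i j (R : Int) (C : Int)) (pvSet g i j (pvGet g i j + 1)) (acc + 1) S hS1 hm1
        have hstep : stepA (f' + 1) g i j
            = (1 + (pvFoldA f' (pvNbrs i j (R : Int) (C : Int))
                      (0, pvSet g i j (pvGet g i j + 1))).1,
               (pvFoldA f' (pvNbrs i j (R : Int) (C : Int))
                  (0, pvSet g i j (pvGet g i j + 1))).2) := by
          rw [stepA_succ, if_neg hg, if_pos hf, hlen, hhd]
          show pvFoldA f' (pvNbrs i j (R : Int) (C : Int)) (1, pvSet g i j (pvGet g i j + 1)) = _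
          rw [pvFoldA_shift]
        have hover1 : (pvOver (pvSet g i j (pvGet g i j + 1)) : Int) = (pvOver g : Int) + 1 := by
          have := pvOver_set g i j hg'
          rw [if_pos hf] at this
          exact this
        refine ⟨?_, ?_, ?_, ?_⟩
        · rw [pvDrain_cons, if_neg hg, if_pos hf, f1, hstep]
          congr 1
          ring
        · rw [hstep]
          dsimp only
          have := pvMeas_set_lt g i j hg' hf
          omega
        · rw [hstep]
          dsimp only
          exact f3
        · rw [hstep]
          dsimp only
          omega
      · -- no flash: just the increment
        have hover1 : (pvOver (pvSet g i j (pvGet g i j + 1)) : Int) = (pvOver g : Int) := by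
          have := pvOver_set g i j hg'
          rw [if_neg hf] at this
          simpa using this
        refine ⟨?_, ?_, ?_, ?_⟩
        · rw [pvDrain_cons, if_neg hg, if_neg hf]
          simp only [stepA_succ, if_neg hg, if_neg hf, add_zero]
        · simp only [stepA_succ, if_neg hg, if_neg hf]
          exact pvMeas_set_le g i j hg'
        · simp only [stepA_succ, if_neg hg, if_neg hf]
          exact hS1
        · simp only [stepA_succ, if_neg hg, if_neg hf]
          omega


-- a full drain call is the row-by-row refuelled fold A's triple loop performs
def pvFoldTop (L : List (Int × Int)) (s : Int × List (List Int)) : Int × List (List Int) :=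
  L.foldl (fun s p => (s.1 + (stepA (pvMeas s.2 + 1) s.2 p.1 p.2).1,
                       (stepA (pvMeas s.2 + 1) s.2 p.1 p.2).2)) s

theorem pvFoldTop_shift (L : List (Int × Int)) (a : Int) (g : List (List Int)) :
    pvFoldTop L (a, g) = (a + (pvFoldTop L (0, g)).1, (pvFoldTop L (0, g)).2) := by
  exact foldl_shift (α := Int × Int) (fun h q => stepA (pvMeas h + 1) h q.1 q.2) L a g

theorem drain_foldTop (R C : Nat) :
    ∀ (L : List (Int × Int)) (g : List (List Int)) (acc : Int), ShapedG R C g →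
      pvDrain (R : Int) (C : Int) g acc L = (acc + (pvFoldTop L (0, g)).1, (pvFoldTop L (0, g)).2)
        ∧ ShapedG R C (pvFoldTop L (0, g)).2
        ∧ ((pvOver (pvFoldTop L (0, g)).2 : Int) = (pvOver g : Int) + (pvFoldTop L (0, g)).1) := by
  intro L
  induction L with
  | nil =>
    intro g acc hS
    have e : pvFoldTop [] ((0 : Int), g) = (0, g) := rfl
    rw [e, pvDrain_nil]
    exact ⟨by rw [add_zero], hS, by simp⟩
  | cons p t ih =>
    intro g acc hS
    obtain ⟨h1, h2, h3, h4⟩ := stepA_sim (pvMeas g + 1) R C g p.1 p.2 acc t hS (Nat.lt_succ_self _)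
    obtain ⟨i1, i2, i3⟩ := ih (stepA (pvMeas g + 1) g p.1 p.2).2
      (acc + (stepA (pvMeas g + 1) g p.1 p.2).1) h3
    have hfold : pvFoldTop (p :: t) (0, g)
        = (0 + (stepA (pvMeas g + 1) g p.1 p.2).1
             + (pvFoldTop t (0, (stepA (pvMeas g + 1) g p.1 p.2).2)).1,
           (pvFoldTop t (0, (stepA (pvMeas g + 1) g p.1 p.2).2)).2) := by
      show pvFoldTop t (0 + (stepA (pvMeas g + 1) g p.1 p.2).1,
        (stepA (pvMeas g + 1) g p.1 p.2).2) = _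
      rw [pvFoldTop_shift]
    refine ⟨?_, ?_, ?_⟩
    · rw [h1, i1, hfold]
      congr 1
      ring
    · rw [hfold]
      exact i2
    · rw [hfold]
      dsimp only
      omega

-- nested loops over ranges are a single fold over the row-major seed list
theorem foldl_nested_seeds {α : Type} (R C : Int) (B : α → Int × Int → α) (a : α) :
    (PySem.List.pyRange 0 R 1).foldl (fun s i =>
      (PySem.List.pyRange 0 C 1).foldl (fun s2 j => B s2 (i, j)) s) a
      = (pvSeeds R C).foldl B a := by
  rw [pvSeeds, foldl_flatMap_foldl]
  apply foldl_congr_invar (P := fun _ : α => True) _ _ _ _ trivial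
  · intro a x _
    rw [List.foldl_map]
  · intro _ _ _
    trivial

theorem shaped_step_top (R C : Nat) (g : List (List Int)) (i j : Int) (h : ShapedG R C g) :
    ShapedG R C (stepA (pvMeas g + 1) g i j).2 :=
  (stepA_sim (pvMeas g + 1) R C g i j 0 [] h (Nat.lt_succ_self _)).2.2.1

theorem pass1_eq (R C : Nat) (g : List (List Int)) (res : Int)
    (hS : ShapedG R C g) (hR : 0 < R) :
    pvPass1 (res, g)
      = (res + (pvDrain (R : Int) (C : Int) g 0 (pvSeeds (R : Int) (C : Int))).1,
         (pvDrain (R : Int) (C : Int) g 0 (pvSeeds (R : Int) (C : Int))).2) := by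
  obtain ⟨d1, _, _⟩ := drain_foldTop R C (pvSeeds (R : Int) (C : Int)) g 0 hS
  have hcongr : pvPass1 (res, g)
      = (PySem.List.pyRange 0 (R : Int) 1).foldl (fun s i =>
          (PySem.List.pyRange 0 (C : Int) 1).foldl (fun s2 j =>
            (s2.1 + (stepA (pvMeas s2.2 + 1) s2.2 i j).1,
             (stepA (pvMeas s2.2 + 1) s2.2 i j).2)) s) (res, g) := by
    show (PySem.List.pyRange 0 ((res, g).2.length : Int) 1).foldl _ (res, g) = _
    rw [show ((res, g).2.length : Int) = (R : Int) by dsimp only; rw [hS.1]]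
    apply foldl_congr_invar (P := fun s : Int × List (List Int) => ShapedG R C s.2)
    · exact hS
    · intro a x ha
      rw [shaped_headD ha hR]
    · intro a x ha
      exact foldl_invar (P := fun s : Int × List (List Int) => ShapedG R C s.2) _ _ _ ha
        (fun s y hs => shaped_step_top R C s.2 x y hs)
  rw [hcongr, foldl_nested_seeds (R : Int) (C : Int)
    (fun s2 (p : Int × Int) => (s2.1 + (stepA (pvMeas s2.2 + 1) s2.2 p.1 p.2).1,
      (stepA (pvMeas s2.2 + 1) s2.2 p.1 p.2).2)) (res, g)]
  rw [show ((pvSeeds (R : Int) (C : Int)).foldl (fun s2 (p : Int × Int) =>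
      (s2.1 + (stepA (pvMeas s2.2 + 1) s2.2 p.1 p.2).1,
       (stepA (pvMeas s2.2 + 1) s2.2 p.1 p.2).2)) (res, g))
    = pvFoldTop (pvSeeds (R : Int) (C : Int)) (res, g) from rfl]
  rw [pvFoldTop_shift, d1]
  dsimp only
  rw [zero_add]


-- A's count-and-zero pass computes (number of cells > 9, grid with those cells zeroed)
theorem pass2_inner (pre post : List (List Int)) :
    ∀ (todo done : List Int) (cnt : Int),
    (PySem.List.pyRange (done.length : Int) ((done.length : Int) + (todo.length : Int)) 1).foldl
      (fun s2 j => if 9 < pvGet s2.2 (pre.length : Int) j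
                   then (s2.1 + 1, pvSet s2.2 (pre.length : Int) j 0) else s2)
      (cnt, pre ++ (done ++ todo) :: post)
    = (cnt + (pvRowOver todo : Int), pre ++ (done ++ pvResetRow todo) :: post) := by
  intro todo
  induction todo with
  | nil =>
    intro done cnt
    rw [PySem.List.pyRange_one_eq_nil (by simp)]
    simp [pvRowOver, pvResetRow]
  | cons a t ih =>
    intro done cnt
    rw [PySem.List.pyRange_one_cons (by push_cast [List.length_cons]; omega), List.foldl_cons]
    have hget : pvGet (pre ++ (done ++ a :: t) :: post) (pre.length : Int) (done.length : Int)
        = a := by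
      unfold pvGet
      rw [Int.toNat_natCast, Int.toNat_natCast, getD_mid, getD_mid]
    have hset : pvSet (pre ++ (done ++ a :: t) :: post) (pre.length : Int) (done.length : Int) 0
        = pre ++ ((done ++ [0]) ++ t) :: post := by
      unfold pvSet
      rw [Int.toNat_natCast, Int.toNat_natCast, getD_mid, set_mid, set_mid]
      simp
    have e1 : (done.length : Int) + 1 = ((done ++ [(0 : Int)]).length : Int) := by simp
    have e1' : (done.length : Int) + 1 = ((done ++ [a]).length : Int) := by simp
    have e2 : (done.length : Int) + ((a :: t).length : Int)
        = ((done ++ [(0 : Int)]).length : Int) + (t.length : Int) := by simp; ring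
    have e2' : (done.length : Int) + ((a :: t).length : Int)
        = ((done ++ [a]).length : Int) + (t.length : Int) := by simp; ring
    by_cases hA : 9 < a
    · rw [if_pos (by rw [hget]; exact hA)]
      dsimp only
      rw [hset, e1, e2, ih (done ++ [0]) (cnt + 1)]
      have hro : (pvRowOver (a :: t) : Int) = 1 + (pvRowOver t : Int) := by
        simp [pvRowOver, hA]; ring
      have hrr : pvResetRow (a :: t) = 0 :: pvResetRow t := by
        simp [pvResetRow, hA]
      rw [hro, hrr]
      simp only [Prod.mk.injEq, List.append_assoc, List.singleton_append, and_true]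
      ring
    · rw [if_neg (by rw [hget]; exact hA)]
      have hst : (cnt, pre ++ (done ++ a :: t) :: post)
          = (cnt, pre ++ ((done ++ [a]) ++ t) :: post) := by simp
      rw [hst, e1', e2', ih (done ++ [a]) cnt]
      have hro : (pvRowOver (a :: t) : Int) = (pvRowOver t : Int) := by
        simp [pvRowOver, hA]
      have hrr : pvResetRow (a :: t) = a :: pvResetRow t := by
        simp [pvResetRow, hA]
      rw [hro, hrr]
      simp [List.append_assoc]

theorem pass2_outer (C : Nat) :
    ∀ (todo pre : List (List Int)) (cnt : Int),
    (∀ r ∈ pre, r.length = C) → (∀ r ∈ todo, r.length = C) → pre ++ todo ≠ [] →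
    (PySem.List.pyRange (pre.length : Int) ((pre.length : Int) + (todo.length : Int)) 1).foldl
      (fun s i => (PySem.List.pyRange 0 ((s.2.headD []).length : Int) 1).foldl
        (fun s2 j => if 9 < pvGet s2.2 i j then (s2.1 + 1, pvSet s2.2 i j 0) else s2) s)
      (cnt, pre ++ todo)
    = (cnt + (pvOver todo : Int), pre ++ todo.map pvResetRow) := by
  intro todo
  induction todo with
  | nil =>
    intro pre cnt _ _ _
    rw [PySem.List.pyRange_one_eq_nil (by simp)]
    simp [pvOver]
  | cons r t ih =>
    intro pre cnt hpre htodo hne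
    rw [PySem.List.pyRange_one_cons (by push_cast [List.length_cons]; omega), List.foldl_cons]
    have hhd : ((pre ++ r :: t).headD []).length = C := by
      apply headD_len _ (by simp)
      intro x hx
      rcases List.mem_append.mp hx with h | h
      · exact hpre x h
      · exact htodo x h
    have hCr : C = r.length := (htodo r (by simp)).symm
    dsimp only
    rw [hhd, hCr]
    have hin := pass2_inner pre t r [] cnt
    simp only [List.length_nil, Nat.cast_zero, zero_add, List.nil_append] at hin
    rw [hin]
    have e1 : (pre.length : Int) + 1 = ((pre ++ [pvResetRow r]).length : Int) := by simp
    have e2 : (pre.length : Int) + ((r :: t).length : Int)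
        = ((pre ++ [pvResetRow r]).length : Int) + (t.length : Int) := by simp; ring
    have hst : pre ++ pvResetRow r :: t = (pre ++ [pvResetRow r]) ++ t := by simp
    rw [e1, e2, hst, ih (pre ++ [pvResetRow r]) (cnt + (pvRowOver r : Int))
      (by intro x hx
          rcases List.mem_append.mp hx with h | h
          · exact hpre x h
          · simp at h; subst h; simp [pvResetRow, hCr.symm])
      (fun x hx => htodo x (by simp [hx]))
      (by simp)]
    have hov : (pvOver (r :: t) : Int) = (pvRowOver r : Int) + (pvOver t : Int) := by
      simp [pvOver]
    rw [hov]
    simp only [Prod.mk.injEq, List.append_assoc, List.singleton_append, List.map_cons, and_true]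
    ring

theorem pass2_eq (R C : Nat) (g : List (List Int)) (hS : ShapedG R C g) (hR : 0 < R) :
    pvPass2 g = ((pvOver g : Int), g.map pvResetRow) := by
  have hgne : g ≠ [] := by
    intro h; rw [h] at hS; have := hS.1; simp at this; omega
  have := pass2_outer C g [] 0 (by simp) hS.2 (by simpa using hgne)
  simp only [List.length_nil, Nat.cast_zero, zero_add, List.nil_append] at this
  show (PySem.List.pyRange 0 (g.length : Int) 1).foldl _ ((0 : Int), g) = _
  rw [this]

theorem shaped_reset {R C : Nat} {g : List (List Int)} (h : ShapedG R C g) :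
    ShapedG R C (g.map pvResetRow) := by
  refine ⟨by simpa using h.1, ?_⟩
  intro r hr
  rcases List.mem_map.mp hr with ⟨r0, hr0, rfl⟩
  simpa [pvResetRow] using h.2 r0 hr0

-- one step of each outer loop agrees; iterate
theorem loop_eq (R C : Nat) (hR : 0 < R) :
    ∀ (k : Nat) (n res : Int) (g : List (List Int)), ShapedG R C g → pvOver g = 0 →
      pvLoopA k n res g = pvLoopB k (R : Int) (C : Int) n res g := by
  intro k
  induction k with
  | zero => intro n res g _ _; rfl
  | succ k ih =>
    intro n res g hS hO
    obtain ⟨d1, d2, d3⟩ := drain_foldTop R C (pvSeeds (R : Int) (C : Int)) g 0 hS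
    rw [zero_add] at d1
    have hDS : ShapedG R C (pvDrain (R : Int) (C : Int) g 0 (pvSeeds (R : Int) (C : Int))).2 := by
      rw [d1]; exact d2
    have hDover : (pvOver (pvDrain (R : Int) (C : Int) g 0 (pvSeeds (R : Int) (C : Int))).2 : Int)
        = (pvDrain (R : Int) (C : Int) g 0 (pvSeeds (R : Int) (C : Int))).1 := by
      rw [d1]; dsimp only; rw [d3, hO]; simp
    have hp1 := pass1_eq R C g res hS hR
    have hp2 := pass2_eq R C
      (pvDrain (R : Int) (C : Int) g 0 (pvSeeds (R : Int) (C : Int))).2 hDS hR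
    have hlenR : (((pvDrain (R : Int) (C : Int) g 0
        (pvSeeds (R : Int) (C : Int))).2.map pvResetRow).length : Int) = (R : Int) := by
      simp [(shaped_reset hDS).1]
    have hlenC : ((((pvDrain (R : Int) (C : Int) g 0
        (pvSeeds (R : Int) (C : Int))).2.map pvResetRow).headD []).length : Int) = (C : Int) := by
      rw [shaped_headD (shaped_reset hDS) hR]
    show (if (pvPass2 (pvPass1 (res, g)).2).1
            = ((pvPass2 (pvPass1 (res, g)).2).2.length : Int)
              * (((pvPass2 (pvPass1 (res, g)).2).2.headD []).length : Int)
          then n + 1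
          else pvLoopA k (n+1) (pvPass1 (res, g)).1 (pvPass2 (pvPass1 (res, g)).2).2)
        = _
    rw [hp1]
    dsimp only
    rw [hp2]
    dsimp only
    rw [hDover, hlenR, hlenC]
    show _ = (if (pvDrain (R : Int) (C : Int) g 0 (pvSeeds (R : Int) (C : Int))).1
                 = (R : Int) * (C : Int)
              then n + 1
              else pvLoopB k (R : Int) (C : Int) (n+1)
                (res + (pvDrain (R : Int) (C : Int) g 0 (pvSeeds (R : Int) (C : Int))).1)
                ((pvDrain (R : Int) (C : Int) g 0 (pvSeeds (R : Int) (C : Int))).2.map pvResetRow))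
    by_cases hc : (pvDrain (R : Int) (C : Int) g 0 (pvSeeds (R : Int) (C : Int))).1
        = (R : Int) * (C : Int)
    · rw [if_pos hc, if_pos hc]
    · rw [if_neg hc, if_neg hc]
      exact ih (n+1) (res + (pvDrain (R : Int) (C : Int) g 0 (pvSeeds (R : Int) (C : Int))).1)
        ((pvDrain (R : Int) (C : Int) g 0 (pvSeeds (R : Int) (C : Int))).2.map pvResetRow)
        (shaped_reset hDS) (pvOver_reset _)

theorem digit_val (c : Char) (h1 : 48 ≤ c.toNat) (h2 : c.toNat ≤ 57) :
    (PySem.Int.ofStr? (String.ofList [c])).getD 0 ≤ 9 := by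
  have hc : Char.ofNat c.toNat = c := Char.ofNat_toNat c
  interval_cases c.toNat <;> rw [← hc] <;> decide

-- ===== VERDICT (by name: the statement is the Claim_ definition above) =====
theorem part2_spec : Claim_equal_part2 := by
  intro input _ hpre
  obtain ⟨hne, hdigB, hrectB⟩ := hpre
  have hbr : ∀ s : String, (PySem.Str.strip s).toList = PySem.Chars.strip s.toList :=
    fun s => by simp
  have hdig : ∀ line ∈ input, ∀ c ∈ (PySem.Str.strip line).toList,
      48 ≤ c.toNat ∧ c.toNat ≤ 57 := by
    intro line hl c hc
    rw [List.all_eq_true] at hdigB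
    have h1 := hdigB line hl
    rw [List.all_eq_true] at h1
    rw [hbr] at hc
    have := h1 c hc
    simp at this
    exact this
  have hrect : ∀ line ∈ input,
      (PySem.Str.strip line).toList.length = (PySem.Str.strip (input.headD "")).toList.length := by
    intro line hl
    rw [List.all_eq_true] at hrectB
    have := hrectB line hl
    simp only [beq_iff_eq] at this
    rw [hbr, hbr]
    exact this
  unfold Spec_part2 part2 part2_alt
  set energy := input.map (fun line =>
    (PySem.Str.strip line).toList.map (fun c => (PySem.Int.ofStr? (String.ofList [c])).getD 0))
    with henergy
  show pvLoopA 10000000 0 0 (pvParse input)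
      = pvLoopB 10000000 (energy.length : Int) ((energy.headD []).length : Int) 0 0 energy
  have hpe : pvParse input = energy := rfl
  rw [hpe]
  have hrowlen : ∀ r ∈ energy, r.length = ((PySem.Str.strip (input.headD "")).toList).length := by
    intro r hr
    rw [henergy] at hr
    rcases List.mem_map.mp hr with ⟨line, hline, rfl⟩
    simpa using hrect line hline
  have hR : 0 < energy.length := by
    rw [henergy]
    simp only [List.length_map]
    cases input with
    | nil => exact absurd rfl hne
    | cons a t => simp
  have hC : (energy.headD []).length = ((PySem.Str.strip (input.headD "")).toList).length := by
    apply headD_len _ _ hrowlen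
    intro h
    rw [h] at hR
    simp at hR
  have hS : ShapedG energy.length (energy.headD []).length energy := by
    refine ⟨rfl, ?_⟩
    intro r hr
    rw [hC]
    exact hrowlen r hr
  have hO : pvOver energy = 0 := by
    rw [pvOver_eq_zero_iff]
    intro r hr e he
    rw [henergy] at hr
    rcases List.mem_map.mp hr with ⟨line, hline, rfl⟩
    rcases List.mem_map.mp he with ⟨c, hc, rfl⟩
    obtain ⟨hd1, hd2⟩ := hdig line hline c hc
    exact digit_val c hd1 hd2
  exact loop_eq energy.length (energy.headD []).length hR 10000000 0 0 energy hS hO
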